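-- pv_equiv track=rewrite | github.com/julianazacharias/code-signal-courses | fundamental-interview-preparation/02-loops/05-consecutive-character-strings.py | solution
-- ===== SOURCE A (Python) =====
-- def solution(s):
--     result = ""
--     current_group_pair = None
--     current_group_length = 0
--
--     for i in range(0, len(s), 2):
--         pair = s[i:i+2]
--         if pair.isdigit() or pair.isalpha():
--             if pair == current_group_pair:
--                 current_group_length += 1
--             else:
--                 if current_group_pair is not None:
--                     result += current_group_pair
--                     result += str(current_group_length)
--                 current_group_pair = pair
--                 current_group_length = 1
--     if current_group_pair is not None:
--         result += current_group_pair
--         result += str(current_group_length)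
--     # else:
--     #     result += current_group_pair
--     #     result += str(current_group_length)
--     return result
-- ===== SOURCE B (Python) =====
-- def solution(s):
--     # run-length encode by run boundaries: collect the valid pairs, compute the
--     # indices where a new run starts (plus the end), then emit pair+length from
--     # consecutive boundary differences
--     v = [s[i:i+2] for i in range(0, len(s), 2)
--          if s[i:i+2].isdigit() or s[i:i+2].isalpha()]
--     bounds = [i for i in range(len(v) + 1)
--               if i == 0 or i == len(v) or v[i] != v[i - 1]]
--     return "".join(v[a] + str(b - a) for a, b in zip(bounds, bounds[1:]))
-- ===== Notes on version B (the rewrite author's own statement) =====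
-- stated objective: alternative
-- what changed: A's streaming state machine (current pair + running count, flushed on change and at the end) is replaced by a boundary-index algorithm: collect the valid pairs, compute the list of run-boundary indices (run starts plus the end), and emit each part from the pair at a boundary and the difference of consecutive boundaries.
import Mathlib
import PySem

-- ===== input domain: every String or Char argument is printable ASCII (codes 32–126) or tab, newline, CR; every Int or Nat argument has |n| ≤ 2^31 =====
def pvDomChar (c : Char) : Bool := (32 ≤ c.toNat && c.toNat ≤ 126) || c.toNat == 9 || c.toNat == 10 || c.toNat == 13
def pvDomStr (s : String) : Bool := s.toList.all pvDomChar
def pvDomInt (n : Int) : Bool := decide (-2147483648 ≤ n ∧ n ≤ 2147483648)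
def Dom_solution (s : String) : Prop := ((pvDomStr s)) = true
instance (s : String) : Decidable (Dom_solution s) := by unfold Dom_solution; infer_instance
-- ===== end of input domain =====

-- B replaces A's streaming state machine by a boundary-index algorithm (run-start indices, consecutive differences); objective: alternative, same cost.

-- ===== PORT A =====
-- the loop body of A (on the current pair s[i:i+2]); state = (result, current_group_pair, current_group_length)
def pvStepA (st : List Char × Option (List Char) × Int) (pair : List Char) :
    List Char × Option (List Char) × Int :=
  if PySem.Chars.strIsdigit pair || PySem.Chars.strIsalpha pair then
    if some pair == st.2.1 then (st.1, st.2.1, st.2.2 + 1)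
    else
      match st.2.1 with
      | some cur => (st.1 ++ cur ++ PySem.Int.toChars st.2.2, some pair, 1)
      | none => (st.1, some pair, 1)
  else st

def solution (s : String) : String :=
  let st := (PySem.List.pyRange 0 (PySem.Str.len s) 2).foldl
      (fun st i => pvStepA st (PySem.List.slice s.toList (some i) (some (i + 2)))) ([], none, 0)
  match st.2.1 with
  | some cur => String.ofList (st.1 ++ cur ++ PySem.Int.toChars st.2.2)
  | none => String.ofList st.1

-- ===== PORT B =====
-- Source B line 1: the list of valid pairs
def pvPairs (s : String) : List (List Char) :=
  ((PySem.List.pyRange 0 (PySem.Str.len s) 2).map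
      (fun i => PySem.List.slice s.toList (some i) (some (i + 2)))).filter
      (fun p => PySem.Chars.strIsdigit p || PySem.Chars.strIsalpha p)

-- Source B line 2: the run-boundary indices (i == 0, i == len(v), or v[i] != v[i-1])
def pvBounds (v : List (List Char)) : List Int :=
  (PySem.List.pyRange 0 ((v.length : Int) + 1) 1).filter
    (fun i => i == 0 || i == (v.length : Int) ||
      !(PySem.List.pyGet? v i == PySem.List.pyGet? v (i - 1)))

-- Source B line 3: join v[a] + str(b - a) over consecutive boundaries; v[a] is always in
-- range (a is a first component of the zip, hence < len(v)), so .getD [] is an unreachable default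
def solution_alt (s : String) : String :=
  let v := pvPairs s
  let bounds := pvBounds v
  String.ofList (PySem.Chars.join []
    ((bounds.zip (PySem.List.slice bounds (some 1) none)).map
      (fun ab => (PySem.List.pyGet? v ab.1).getD [] ++ PySem.Int.toChars (ab.2 - ab.1))))

-- ===== PRECONDITION & SPEC =====
def Spec_solution (s : String) (out : String) : Prop := out = solution_alt s
instance (s : String) (out : String) : Decidable (Spec_solution s out) := by unfold Spec_solution; infer_instance

-- ===== CLAIM (what is proved, stated in full; the proofs are below) =====
def Claim_equal_solution : Prop := ∀ (s : String), Dom_solution s → Spec_solution s (solution s)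

-- ===== LEMMAS AND PROOFS =====

-- ---- A side: A's fold equals run-length groups of the filtered pair list ----

-- the valid-pair step (A's branch after the isdigit/isalpha test)
def pvStep2 (st : List Char × Option (List Char) × Int) (pair : List Char) :
    List Char × Option (List Char) × Int :=
  if some pair == st.2.1 then (st.1, st.2.1, st.2.2 + 1)
  else
    match st.2.1 with
    | some cur => (st.1 ++ cur ++ PySem.Int.toChars st.2.2, some pair, 1)
    | none => (st.1, some pair, 1)

def pvValid (p : List Char) : Bool := PySem.Chars.strIsdigit p || PySem.Chars.strIsalpha p

lemma pvStepA_eq (st : List Char × Option (List Char) × Int) (p : List Char) :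
    pvStepA st p = if pvValid p then pvStep2 st p else st := rfl

def pvFinal (st : List Char × Option (List Char) × Int) : List Char :=
  match st.2.1 with
  | some cur => st.1 ++ cur ++ PySem.Int.toChars st.2.2
  | none => st.1

lemma pv_foldl_filter (l : List (List Char)) (st : List Char × Option (List Char) × Int) :
    l.foldl pvStepA st = (l.filter pvValid).foldl pvStep2 st := by
  induction l generalizing st with
  | nil => rfl
  | cons p rest ih =>
    by_cases h : pvValid p = true <;>
      simp [h, pvStepA_eq, ih]

lemma pv_join_nil_cons (x : List Char) (l : List (List Char)) :
    PySem.Chars.join [] (x :: l) = x ++ PySem.Chars.join [] l := by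
  cases l with
  | nil => simp [PySem.Chars.join_singleton, PySem.Chars.join_nil]
  | cons y l' => simp [PySem.Chars.join_cons_cons]

-- the run-length groups of a pair list (proof-side specification both ports are reduced to)
def pvGroupRuns (pairs : List (List Char)) : List (List Char) :=
  match pairs with
  | [] => []
  | p :: rest =>
    let run := rest.takeWhile (· == p)
    (p ++ PySem.Int.toChars ((run.length : Int) + 1)) :: pvGroupRuns (rest.dropWhile (· == p))
termination_by pairs.length
decreasing_by
  simp only [List.length_cons]
  exact Nat.lt_succ_of_le (List.length_dropWhile_le _ rest)

lemma pv_run_lemma (pairs : List (List Char)) (res cur : List Char) (len : Int) :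
    pvFinal (pairs.foldl pvStep2 (res, some cur, len)) =
      res ++ cur ++ PySem.Int.toChars (len + ((pairs.takeWhile (· == cur)).length : Int)) ++
        PySem.Chars.join [] (pvGroupRuns (pairs.dropWhile (· == cur))) := by
  induction pairs generalizing res cur len with
  | nil => simp [pvFinal, pvGroupRuns, PySem.Chars.join_nil]
  | cons p rest ih =>
    by_cases h : p = cur
    · subst h
      have h1 : (List.foldl pvStep2 (res, some p, len) (p :: rest)) =
          List.foldl pvStep2 (res, some p, len + 1) rest := by
        simp [List.foldl_cons, pvStep2]
      have h2 : List.takeWhile (fun x => x == p) (p :: rest) =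
          p :: List.takeWhile (fun x => x == p) rest := by
        simp
      have h3 : List.dropWhile (fun x => x == p) (p :: rest) =
          List.dropWhile (fun x => x == p) rest := by
        simp
      have h4 : len + (((List.takeWhile (fun x => x == p) rest).length + 1 : ℕ) : ℤ) =
          len + 1 + ((List.takeWhile (fun x => x == p) rest).length : ℤ) := by
        push_cast; ring
      rw [h1, ih, h2, h3, List.length_cons, h4]
    · have hne : (some p == some cur) = false := by simp [h]
      have h1 : (List.foldl pvStep2 (res, some cur, len) (p :: rest)) =
          List.foldl pvStep2 (res ++ cur ++ PySem.Int.toChars len, some p, 1) rest := by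
        simp [List.foldl_cons, pvStep2, hne]
      have ht : List.takeWhile (fun x => x == cur) (p :: rest) = [] := by
        simp [h]
      have hd : List.dropWhile (fun x => x == cur) (p :: rest) = p :: rest := by
        simp [h]
      have h5 : (1 + ((List.takeWhile (fun x => x == p) rest).length : ℤ)) =
          ((List.takeWhile (fun x => x == p) rest).length : ℤ) + 1 := by ring
      rw [h1, ih, ht, hd, List.length_nil, pvGroupRuns, pv_join_nil_cons, h5]
      simp [List.append_assoc]

lemma pv_start_lemma (pairs : List (List Char)) (res : List Char) :
    pvFinal (pairs.foldl pvStep2 (res, none, 0)) =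
      res ++ PySem.Chars.join [] (pvGroupRuns pairs) := by
  cases pairs with
  | nil => simp [pvFinal, pvGroupRuns, PySem.Chars.join_nil]
  | cons p rest =>
    have h1 : (List.foldl pvStep2 (res, none, 0) (p :: rest)) =
        List.foldl pvStep2 (res, some p, 1) rest := by
      simp [List.foldl_cons, pvStep2]
    have h5 : (1 + ((List.takeWhile (fun x => x == p) rest).length : ℤ)) =
        ((List.takeWhile (fun x => x == p) rest).length : ℤ) + 1 := by ring
    rw [h1, pv_run_lemma, pvGroupRuns, pv_join_nil_cons, h5]
    simp [List.append_assoc]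

lemma pv_solution_eq_groupRuns (s : String) :
    solution s = String.ofList (PySem.Chars.join [] (pvGroupRuns (pvPairs s))) := by
  unfold solution pvPairs
  dsimp only
  rw [← List.foldl_map, pv_foldl_filter]
  have hv : (fun p => PySem.Chars.strIsdigit p || PySem.Chars.strIsalpha p) = pvValid := rfl
  rw [hv]
  set ps := ((PySem.List.pyRange 0 (PySem.Str.len s) 2).map
      (fun i => PySem.List.slice s.toList (some i) (some (i + 2)))).filter pvValid with hps
  have h := pv_start_lemma ps []
  rw [List.nil_append] at h
  rw [← h]
  obtain ⟨r, c, ln⟩ := ps.foldl pvStep2 ([], none, 0)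
  cases c <;> rfl

-- ---- B side: the boundary-index computation equals the same run-length groups ----

-- the boundary predicate over Nat indices, and the Nat form of pvBounds
def pvPN (v : List (List Char)) (j : Nat) : Bool :=
  j == 0 || j == v.length || !(v[j]? == v[j-1]?)

def pvNB (v : List (List Char)) : List Nat :=
  (List.range (v.length + 1)).filter (pvPN v)

lemma pvBounds_eq (v : List (List Char)) :
    pvBounds v = (pvNB v).map (fun j : Nat => (j : Int)) := by
  unfold pvBounds pvNB
  have h1 : ((v.length : Int) + 1) = ((v.length + 1 : Nat) : Int) := by push_cast; ring
  rw [h1, PySem.List.pyRange_zero_natCast, List.filter_map]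
  have hfun : ((fun i => i == 0 || i == ((v.length : Nat) : Int) ||
        !(PySem.List.pyGet? v i == PySem.List.pyGet? v (i - 1))) ∘ (fun k : Nat => (k : Int)))
      = pvPN v := by
    funext j
    cases j with
    | zero => simp [pvPN]
    | succ m =>
      have hg1 : PySem.List.pyGet? v ((((m+1) : Nat) : Int)) = v[m+1]? := by
        simp only [PySem.List.pyGet?_natCast]
      have hg2 : PySem.List.pyGet? v ((((m+1) : Nat) : Int) - 1) = v[m]? := by
        have : ((((m+1) : Nat) : Int) - 1) = ((m : Nat) : Int) := by push_cast; ring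
        rw [this]; simp only [PySem.List.pyGet?_natCast]
      simp only [Function.comp, pvPN, hg1, hg2]
      have e1 : ((((m+1) : Nat) : Int) == 0) = ((m+1 : Nat) == 0) := by
        rw [Bool.eq_iff_iff]; simp only [beq_iff_eq]; omega
      have e2 : ((((m+1) : Nat) : Int) == (v.length : Int)) = ((m+1 : Nat) == v.length) := by
        rw [Bool.eq_iff_iff]; simp only [beq_iff_eq]; omega
      rw [e1, e2]
      rfl
  rw [hfun]

-- every index below the run length reads the run's pair
lemma pv_getElem_run (p : List Char) (rest v' : List (List Char)) (j : Nat)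
    (hj : j < (rest.takeWhile (· == p)).length + 1) :
    ((p :: rest.takeWhile (· == p)) ++ v')[j]? = some p := by
  have hlt : j < (p :: rest.takeWhile (· == p)).length := by
    simpa using hj
  rw [List.getElem?_append_left hlt, List.getElem?_eq_getElem hlt]
  congr 1
  have hmem : (p :: rest.takeWhile (· == p))[j] ∈ p :: rest.takeWhile (· == p) :=
    List.getElem_mem hlt
  rcases List.mem_cons.mp hmem with h | h
  · exact h
  · have := List.mem_takeWhile_imp h
    simpa [beq_iff_eq] using this

-- the run decomposition of the boundary list
lemma pvNB_cons (p : List Char) (rest : List (List Char)) :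
    pvNB (p :: rest) =
      0 :: (pvNB (rest.dropWhile (· == p))).map
        (fun j => (rest.takeWhile (· == p)).length + 1 + j) := by
  set t := rest.takeWhile (· == p) with ht
  set v' := rest.dropWhile (· == p) with hv'
  set k := t.length + 1 with hk
  have hsplit : p :: rest = (p :: t) ++ v' := by
    rw [List.cons_append, ht, hv', List.takeWhile_append_dropWhile]
  have hlen : (p :: rest).length = k + v'.length := by
    rw [hsplit]; simp [hk]; omega
  unfold pvNB
  rw [show (p :: rest).length + 1 = k + (v'.length + 1) from by omega]
  rw [List.range_add, List.filter_append, List.filter_map]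
  have hrun : ∀ j, j < k → (p :: rest)[j]? = some p := by
    intro j hj
    rw [hsplit]
    exact pv_getElem_run p rest v' j (by omega)
  have hfirst : (List.range k).filter (pvPN (p :: rest)) = [0] := by
    rw [List.filter_congr (q := fun j => j == 0) ?_]
    · rw [hk, List.range_succ_eq_map, List.filter_cons]
      simp [List.filter_map, Function.comp]
    · intro j hj
      have hjk : j < k := List.mem_range.mp hj
      cases j with
      | zero => simp [pvPN]
      | succ m =>
        have h2 : ¬ (m + 1 = (p :: rest).length) := by rw [hlen]; omega
        have h2' : ¬ (m = rest.length) := by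
          have := hlen; simp at this; omega
        have h3 : (p :: rest)[m+1]? = some p := hrun _ hjk
        have h4 : (p :: rest)[m]? = some p := hrun _ (by omega)
        simp [pvPN, h2', h3, h4]
  have hsecond : ∀ i ∈ List.range (v'.length + 1),
      (pvPN (p :: rest) ∘ (fun x => k + x)) i = pvPN v' i := by
    intro i hi
    have hiL : i < v'.length + 1 := List.mem_range.mp hi
    cases i with
    | zero =>
      simp only [Function.comp, Nat.add_zero]
      cases hve : v' with
      | nil =>
        have h2 : k = (p :: rest).length := by rw [hlen, hve]; simp
        simp [pvPN, h2]
      | cons q v'' =>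
        have hqp : (q == p) = false := by
          have hne : List.dropWhile (fun x => x == p) rest ≠ [] := by
            rw [← hv', hve]; simp
          have := List.head_dropWhile_not (fun x => x == p) hne
          simp only [← hv', hve, List.head_cons] at this
          exact this
        have hg : (p :: rest)[k]? = some q := by
          rw [hsplit, List.getElem?_append_right (by simp [hk]), hve]
          simp [hk]
        have hg' : (p :: rest)[k-1]? = some p := hrun _ (by omega)
        have hne : ((p :: rest)[k]? == (p :: rest)[k-1]?) = false := by
          simp [hg, hg', hqp]
        simp [pvPN, hne]
    | succ m =>
      have hg : (p :: rest)[k + (m+1)]? = v'[m+1]? := by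
        rw [hsplit, List.getElem?_append_right (by simp only [List.length_cons, hk]; omega)]
        congr 1
        simp only [List.length_cons, hk]
        omega
      have hg' : (p :: rest)[k + (m+1) - 1]? = v'[m]? := by
        rw [hsplit, List.getElem?_append_right (by simp only [List.length_cons, hk]; omega)]
        congr 1
        simp only [List.length_cons, hk]
        omega
      have e2 : ((k + (m+1)) == (p :: rest).length) = ((m+1) == v'.length) := by
        rw [Bool.eq_iff_iff]; simp only [beq_iff_eq]; omega
      simp only [Function.comp, pvPN, hg, hg', e2]
      have e1 : ((k + (m+1)) == 0) = ((m+1 : Nat) == 0) := by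
        rw [Bool.eq_iff_iff]; simp only [beq_iff_eq]; omega
      rw [e1]
      simp
  rw [hfirst, List.filter_congr hsecond]
  rfl

lemma pvNB_eq_cons (v : List (List Char)) :
    pvNB v = 0 :: ((List.range v.length).map Nat.succ).filter (pvPN v) := by
  unfold pvNB
  rw [List.range_succ_eq_map, List.filter_cons]
  simp [pvPN]

def pvNatParts (v : List (List Char)) : List (List Char) :=
  ((pvNB v).zip (pvNB v).tail).map
    (fun ab => (v[ab.1]?).getD [] ++ PySem.Int.toChars ((ab.2 : Int) - (ab.1 : Int)))

lemma pvNatParts_eq_groupRuns (v : List (List Char)) :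
    pvNatParts v = pvGroupRuns v := by
  induction v using pvGroupRuns.induct with
  | case1 => simp [pvNatParts, pvNB, pvGroupRuns, pvPN]
  | case2 p rest ih =>
    have hsplit : p :: rest = (p :: rest.takeWhile (· == p)) ++ rest.dropWhile (· == p) := by
      rw [List.cons_append, List.takeWhile_append_dropWhile]
    set t := rest.takeWhile (· == p) with ht
    set v' := rest.dropWhile (· == p) with hv'
    set k := t.length + 1 with hk
    set tl' := ((List.range v'.length).map Nat.succ).filter (pvPN v') with htl'
    have hnb : pvNB (p :: rest) = 0 :: k :: tl'.map (fun j => k + j) := by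
      rw [pvNB_cons, pvNB_eq_cons]
      simp [← ht, ← hv', ← hk, ← htl']
    have hnb' : pvNB v' = 0 :: tl' := pvNB_eq_cons v'
    have hget : ∀ a : Nat, (p :: rest)[k + a]? = v'[a]? := by
      intro a
      rw [hsplit, List.getElem?_append_right (by simp only [List.length_cons, hk]; omega)]
      congr 1
      simp only [List.length_cons, hk]
      omega
    unfold pvNatParts
    rw [hnb]
    have hzip : (k :: tl'.map (fun j => k + j)) = (0 :: tl').map (fun j => k + j) := by simp
    rw [pvGroupRuns]
    simp only [List.tail_cons, List.zip_cons_cons, List.map_cons]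
    congr 1
    -- remaining goal: the tail (the head closes by rfl inside congr);
    -- shift by k and use the induction hypothesis
    rw [hzip, List.zip_map, List.map_map]
    have hfun : ((fun ab : Nat × Nat =>
          ((p :: rest)[ab.1]?).getD [] ++ PySem.Int.toChars ((ab.2 : Int) - (ab.1 : Int))) ∘
            Prod.map (fun j => k + j) (fun j => k + j))
        = (fun ab : Nat × Nat =>
          (v'[ab.1]?).getD [] ++ PySem.Int.toChars ((ab.2 : Int) - (ab.1 : Int))) := by
      funext ab
      obtain ⟨a, b⟩ := ab
      simp only [Function.comp, Prod.map, hget]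
      congr 2
      push_cast
      ring
    rw [hfun, ← ih]
    unfold pvNatParts
    rw [hnb']
    rfl

lemma pv_solution_alt_eq_groupRuns (s : String) :
    solution_alt s = String.ofList (PySem.Chars.join [] (pvGroupRuns (pvPairs s))) := by
  unfold solution_alt
  dsimp only
  rw [PySem.List.slice_from_one, pvBounds_eq]
  have htail : ((pvNB (pvPairs s)).map (fun j : Nat => (j : Int))).tail
      = ((pvNB (pvPairs s)).tail).map (fun j : Nat => (j : Int)) := by
    cases pvNB (pvPairs s) <;> rfl
  rw [htail, List.zip_map, List.map_map]
  have hfun : ((fun ab : Int × Int =>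
        (PySem.List.pyGet? (pvPairs s) ab.1).getD [] ++ PySem.Int.toChars (ab.2 - ab.1)) ∘
          Prod.map (fun j : Nat => (j : Int)) (fun j : Nat => (j : Int)))
      = (fun ab : Nat × Nat =>
        ((pvPairs s)[ab.1]?).getD [] ++ PySem.Int.toChars ((ab.2 : Int) - (ab.1 : Int))) := by
    funext ab
    obtain ⟨a, b⟩ := ab
    simp only [Function.comp, Prod.map, PySem.List.pyGet?_natCast]
  rw [hfun, ← pvNatParts_eq_groupRuns]
  rfl

-- ===== VERDICT (by name: the statement is the Claim_ definition above) =====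
theorem solution_spec : Claim_equal_solution := by
  intro s _
  show solution s = solution_alt s
  rw [pv_solution_eq_groupRuns, pv_solution_alt_eq_groupRuns]
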